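-- pv_equiv track=rewrite | github.com/tgbugs/heatmaps | visualization.py | sCollapseToSrcId
-- ===== SOURCE A (Python) =====
-- from collections import defaultdict
--
-- def sCollapseToSrcId(keys, id_name_dict):
--     """
--         Collapse sources that have the same name, really base identifier
--         but that mapping is a bit harder since I'd need to map the base id to
--         the name they have in common... maybe that is better?
--     """
--
--     key_collections_dict = defaultdict(set)
--     new_id_name_dict = {}
--     for key in keys:
--         parent_key = key.rsplit('-',1)[0]
--         key_collections_dict[parent_key].add(key)
--         if parent_key not in new_id_name_dict:
--             new_id_name_dict[parent_key] = id_name_dict[key]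
--         elif new_id_name_dict[parent_key] != id_name_dict[key]:
--             raise NameError('Source names do not match! %s %s' %
--                             (new_id_name_dict[parent_key], id_name_dict[key]))
--
--     return dict(key_collections_dict), new_id_name_dict
-- ===== SOURCE B (Python) =====
-- def sCollapseToSrcId(keys, id_name_dict):
--     # Two-phase decomposition: first group all keys by their parent id,
--     # then validate each group's names in one go and pick the group's name
--     # from its first member.
--     groups = {}
--     for key in keys:
--         groups.setdefault(key.rsplit('-', 1)[0], []).append(key)
--
--     new_id_name_dict = {}
--     for parent, members in groups.items():
--         name = id_name_dict[members[0]]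
--         for k in members[1:]:
--             if id_name_dict[k] != name:
--                 raise NameError('Source names do not match! %s %s' %
--                                 (name, id_name_dict[k]))
--         new_id_name_dict[parent] = name
--
--     return {p: set(m) for p, m in groups.items()}, new_id_name_dict
-- ===== Notes on version B (the rewrite author's own statement) =====
-- stated objective: alternative
-- what changed: A interleaves grouping, name recording and validation in one pass over keys; B first builds parent->members groups in one pass, then derives the name dict and validates names group-by-group from the grouped structure, converting member lists to sets only at the end.
import Mathlib
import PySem

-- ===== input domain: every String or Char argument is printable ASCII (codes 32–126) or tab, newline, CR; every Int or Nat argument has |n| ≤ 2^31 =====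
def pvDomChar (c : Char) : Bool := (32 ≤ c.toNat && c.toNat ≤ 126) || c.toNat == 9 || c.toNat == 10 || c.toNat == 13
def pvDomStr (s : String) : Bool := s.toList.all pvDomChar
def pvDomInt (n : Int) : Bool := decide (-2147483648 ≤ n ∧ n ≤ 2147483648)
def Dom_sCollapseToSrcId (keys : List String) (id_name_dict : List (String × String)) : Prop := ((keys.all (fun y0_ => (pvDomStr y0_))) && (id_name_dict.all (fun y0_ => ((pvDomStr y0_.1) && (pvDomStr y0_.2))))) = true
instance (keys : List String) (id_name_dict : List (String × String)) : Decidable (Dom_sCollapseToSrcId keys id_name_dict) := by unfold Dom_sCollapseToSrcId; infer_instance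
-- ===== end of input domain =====

-- B re-decomposes A's single interleaved pass into: (1) group keys by parent, (2) derive and
-- validate the name of each group from the grouped structure. Equal return values on Pre_.

-- key.rsplit('-', 1)[0] : everything before the last '-', or the whole string if there is none
def pvParent (s : String) : String :=
  let i := PySem.Str.rfind s "-"
  if i < 0 then s else PySem.Str.slice s none (some i)

-- id_name_dict[key] on the association-list representation (first match; none = KeyError)
def pvLookup (id_name_dict : List (String × String)) (k : String) : Option String :=
  (id_name_dict.find? (fun p => p.1 == k)).map (·.2)

-- ===== PORT A =====
-- one iteration of A's loop; the Option state is none exactly where A has raised (KeyError/NameError)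
def pvAStep (id_name_dict : List (String × String))
    (st : Option (PySem.Dict String (PySem.Set String) × PySem.Dict String String))
    (key : String) : Option (PySem.Dict String (PySem.Set String) × PySem.Dict String String) :=
  match st with
  | none => none
  | some (kc, names) =>
      let p := pvParent key
      let kc' := kc.insert p (PySem.Set.add (kc.getD p PySem.Set.empty) key)
      match pvLookup id_name_dict key with
      | none => none                                    -- KeyError
      | some v =>
          if names.contains p then
            match names.get? p with
            | some w => if w = v then some (kc', names) else none   -- NameError on mismatch
            | none => none
          else some (kc', names.insert p v)

def sCollapseToSrcId (keys : List String) (id_name_dict : List (String × String)) :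
    (List (String × List String)) × (List (String × String)) :=
  match keys.foldl (pvAStep id_name_dict) (some (PySem.Dict.empty, PySem.Dict.empty)) with
  | some (kc, names) => (kc.items, names.items)
  | none => ([], [])

-- ===== PORT B =====
def pvBGroups (keys : List String) : PySem.Dict String (List String) :=
  keys.foldl (fun g k => g.modify (pvParent k) [] (· ++ [k])) PySem.Dict.empty

-- one iteration of B's second loop (over groups.items); none where B has raised
def pvBNameStep (id_name_dict : List (String × String))
    (acc : Option (PySem.Dict String String)) (pm : String × List String) :
    Option (PySem.Dict String String) :=
  match acc with
  | none => none
  | some nd =>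
      match pm.2 with
      | [] => none                                      -- members[0]: IndexError (unreachable)
      | k0 :: rest =>
          match pvLookup id_name_dict k0 with
          | none => none                                -- KeyError
          | some name =>
              if rest.all (fun k => pvLookup id_name_dict k == some name) then
                some (nd.insert pm.1 name)
              else none                                 -- KeyError or NameError in the inner loop

def sCollapseToSrcId_alt (keys : List String) (id_name_dict : List (String × String)) :
    (List (String × List String)) × (List (String × String)) :=
  let groups := pvBGroups keys
  match groups.items.foldl (pvBNameStep id_name_dict) (some PySem.Dict.empty) with
  | some nd => (groups.items.map (fun pm => (pm.1, PySem.Set.ofList pm.2)), nd.items)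
  | none => ([], [])

-- ===== PRECONDITION & SPEC =====
-- Pre_ excludes exactly the inputs on which A raises: a key missing from id_name_dict (KeyError)
-- or two keys with the same parent mapped to different names (NameError).
def Pre_sCollapseToSrcId (keys : List String) (id_name_dict : List (String × String)) : Prop :=
  (∀ k ∈ keys, (pvLookup id_name_dict k).isSome = true) ∧
  (∀ k1 ∈ keys, ∀ k2 ∈ keys, pvParent k1 = pvParent k2 →
      pvLookup id_name_dict k1 = pvLookup id_name_dict k2)
instance (keys : List String) (id_name_dict : List (String × String)) : Decidable (Pre_sCollapseToSrcId keys id_name_dict) := by unfold Pre_sCollapseToSrcId; infer_instance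

def pvWitness_sCollapseToSrcId : List String × (List (String × String)) :=
  (["s-1", "s-2", "t"], [("s-1", "S"), ("s-2", "S"), ("t", "T")])

def Spec_sCollapseToSrcId (keys : List String) (id_name_dict : List (String × String)) (out : (List (String × List String)) × (List (String × String))) : Prop := out = sCollapseToSrcId_alt keys id_name_dict
instance (keys : List String) (id_name_dict : List (String × String)) (out : (List (String × List String)) × (List (String × String))) : Decidable (Spec_sCollapseToSrcId keys id_name_dict out) := by unfold Spec_sCollapseToSrcId; infer_instance

-- ===== CLAIM (what is proved, stated in full; the proofs are below) =====
def Claim_equal_sCollapseToSrcId : Prop := ∀ (keys : List String) (id_name_dict : List (String × String)), Dom_sCollapseToSrcId keys id_name_dict → Pre_sCollapseToSrcId keys id_name_dict → Spec_sCollapseToSrcId keys id_name_dict (sCollapseToSrcId keys id_name_dict)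

-- ===== LEMMAS AND PROOFS =====

-- the two accumulators of A's loop, taken separately
def pvStepKC (kc : PySem.Dict String (PySem.Set String)) (k : String) :
    PySem.Dict String (PySem.Set String) :=
  kc.insert (pvParent k) (PySem.Set.add (kc.getD (pvParent k) PySem.Set.empty) k)

def pvStepN (id_name_dict : List (String × String)) (n : PySem.Dict String String) (k : String) :
    PySem.Dict String String :=
  if n.contains (pvParent k) then n
  else n.insert (pvParent k) ((pvLookup id_name_dict k).getD "")

-- under Pre_, A's loop never raises and its two accumulators evolve independently
lemma pv_afold_split (id_name_dict : List (String × String)) (keys0 : List String)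
    (h1 : ∀ k ∈ keys0, (pvLookup id_name_dict k).isSome = true)
    (h2 : ∀ k1 ∈ keys0, ∀ k2 ∈ keys0, pvParent k1 = pvParent k2 →
        pvLookup id_name_dict k1 = pvLookup id_name_dict k2) :
    ∀ ks : List String, (∀ k ∈ ks, k ∈ keys0) →
    ∀ (kc : PySem.Dict String (PySem.Set String)) (N : PySem.Dict String String),
    (∀ p w, N.get? p = some w → ∃ k0, k0 ∈ keys0 ∧ pvParent k0 = p ∧
        pvLookup id_name_dict k0 = some w) →
    ks.foldl (pvAStep id_name_dict) (some (kc, N)) =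
      some (ks.foldl pvStepKC kc, ks.foldl (pvStepN id_name_dict) N) := by
  intro ks
  induction ks with
  | nil => intro _ kc N _; rfl
  | cons k ks ih =>
      intro hks kc N hN
      have hkmem : k ∈ keys0 := hks k (by simp)
      obtain ⟨v, hv⟩ : ∃ v, pvLookup id_name_dict k = some v := by
        have := h1 k hkmem; cases hval : pvLookup id_name_dict k
        · rw [hval] at this; simp at this
        · exact ⟨_, rfl⟩
      simp only [List.foldl_cons]
      by_cases hc : N.contains (pvParent k) = true
      · -- parent already recorded: A compares and keeps going
        obtain ⟨w, hw⟩ : ∃ w, N.get? (pvParent k) = some w := by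
          rw [PySem.Dict.contains_eq_isSome_get?] at hc
          cases hval : N.get? (pvParent k)
          · rw [hval] at hc; simp at hc
          · exact ⟨_, rfl⟩
        obtain ⟨k0, hk0mem, hk0p, hk0v⟩ := hN _ _ hw
        have hsame : pvLookup id_name_dict k0 = pvLookup id_name_dict k :=
          h2 k0 hk0mem k hkmem (by rw [hk0p])
        have hwv : w = v := by
          rw [hk0v, hv] at hsame; exact (Option.some.injEq _ _).mp hsame
        have hstep : pvAStep id_name_dict (some (kc, N)) k = some (pvStepKC kc k, pvStepN id_name_dict N k) := by
          simp [pvAStep, hv, hc, hw, hwv, pvStepKC, pvStepN]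
        rw [hstep]
        have hNeq : pvStepN id_name_dict N k = N := by simp [pvStepN, hc]
        rw [hNeq]
        exact ih (fun x hx => hks x (by simp [hx])) _ _ hN
      · -- fresh parent: both record it
        have hc' : N.contains (pvParent k) = false := by simpa using hc
        have hstep : pvAStep id_name_dict (some (kc, N)) k =
            some (pvStepKC kc k, pvStepN id_name_dict N k) := by
          simp [pvAStep, hv, hc', pvStepKC, pvStepN]
        rw [hstep]
        refine ih (fun x hx => hks x (by simp [hx])) _ _ ?_
        intro p w hw
        rw [pvStepN, if_neg (by simp [hc']), PySem.Dict.get?_insert] at hw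
        by_cases hp : p = pvParent k
        · refine ⟨k, hkmem, hp.symm, ?_⟩
          rw [hp] at hw; simp at hw
          rw [hv]; simp [← hw, hv]
        · rw [if_neg hp] at hw
          exact hN _ _ hw

-- A's collection accumulator tracks B's groups dict: same keys, values related by Set.ofList
lemma pv_kc_groups : ∀ (ks : List String) (kc : PySem.Dict String (PySem.Set String))
    (g : PySem.Dict String (List String)),
    kc.keys = g.keys → (∀ q, kc.getD q PySem.Set.empty = PySem.Set.ofList (g.getD q [])) →
    (ks.foldl pvStepKC kc).keys =
        (ks.foldl (fun g k => g.modify (pvParent k) [] (· ++ [k])) g).keys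
    ∧ ∀ q, (ks.foldl pvStepKC kc).getD q PySem.Set.empty =
        PySem.Set.ofList ((ks.foldl (fun g k => g.modify (pvParent k) [] (· ++ [k])) g).getD q []) := by
  intro ks
  induction ks with
  | nil => intro kc g hk hd; exact ⟨hk, hd⟩
  | cons k ks ih =>
      intro kc g hk hd
      simp only [List.foldl_cons]
      have hmod : g.modify (pvParent k) [] (· ++ [k]) =
          g.insert (pvParent k) (g.getD (pvParent k) [] ++ [k]) := rfl
      have hcont : kc.contains (pvParent k) = g.contains (pvParent k) := by
        rw [PySem.Dict.contains_eq_decide_mem_keys, PySem.Dict.contains_eq_decide_mem_keys, hk]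
      refine ih _ _ ?_ ?_
      · -- keys stay equal
        rw [pvStepKC, hmod]
        by_cases hc : g.contains (pvParent k) = true
        · rw [PySem.Dict.keys_insert_of_contains _ _ (hcont.trans hc),
              PySem.Dict.keys_insert_of_contains _ _ hc]; exact hk
        · have hc' : g.contains (pvParent k) = false := by simpa using hc
          rw [PySem.Dict.keys_insert_of_not_contains _ _ (hcont.trans hc'),
              PySem.Dict.keys_insert_of_not_contains _ _ hc', hk]
      · -- values stay related
        intro q
        rw [pvStepKC, hmod, PySem.Dict.getD_insert, PySem.Dict.getD_insert]
        by_cases hq : q = pvParent k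
        · rw [if_pos hq, if_pos hq, hd]
          simp [PySem.Set.ofList_eq_foldl]
        · rw [if_neg hq, if_neg hq]; exact hd q

-- B's groups dict, characterised: keys = parents in first-touch order, values = filters of keys
lemma pv_groups_keys (keys : List String) :
    (pvBGroups keys).keys = PySem.Set.ofList (keys.map pvParent) := by
  rw [pvBGroups, PySem.Dict.keys_foldl_modify_key keys pvParent [] (fun _ k => (· ++ [k])),
      PySem.Dict.keys_empty]
  rfl

lemma pv_groups_nodup (keys : List String) : (pvBGroups keys).keys.Nodup := by
  rw [pv_groups_keys]; exact PySem.Set.nodup_ofList _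

lemma pv_groups_getD (keys : List String) (q : String) :
    (pvBGroups keys).getD q [] = keys.filter (fun k => pvParent k == q) := by
  have hfold : pvBGroups keys =
      (keys.map (fun k => (pvParent k, k))).foldl
        (fun d p => d.modify p.1 [] (· ++ [p.2])) PySem.Dict.empty := by
    rw [List.foldl_map]; rfl
  rw [hfold, PySem.Dict.getD_foldl_modify_append, PySem.Dict.getD_empty, List.filter_map,
      List.map_map]
  simp [Function.comp_def]

-- A's name accumulator, characterised
lemma pv_na_char (d : List (String × String)) : ∀ (ks : List String) (N : PySem.Dict String String),
    ((ks.foldl (pvStepN d) N).keys = PySem.Set.update N.keys (ks.map pvParent))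
    ∧ ∀ q, (ks.foldl (pvStepN d) N).getD q "" =
        if N.contains q = true then N.getD q ""
        else (((ks.filter (fun k => pvParent k == q)).head?.bind (pvLookup d)).getD "") := by
  intro ks
  induction ks with
  | nil =>
      intro N
      refine ⟨rfl, ?_⟩
      intro q
      by_cases hc : N.contains q = true
      · rw [if_pos hc]; rfl
      · have hc' : N.contains q = false := by simpa using hc
        rw [if_neg hc]
        simp [PySem.Dict.getD_of_not_contains _ _ hc']
  | cons k ks ih =>
      intro N
      simp only [List.foldl_cons]
      by_cases hc : N.contains (pvParent k) = true
      · have hstep : pvStepN d N k = N := by simp [pvStepN, hc]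
        rw [hstep]
        obtain ⟨ihk, ihd⟩ := ih N
        constructor
        · rw [ihk, List.map_cons]
          have hmem : pvParent k ∈ N.keys := (PySem.Dict.contains_iff_mem_keys _ _).mp hc
          have : PySem.Set.update N.keys (pvParent k :: ks.map pvParent) =
              PySem.Set.update (PySem.Set.add N.keys (pvParent k)) (ks.map pvParent) := rfl
          rw [this]
          have hadd : PySem.Set.add N.keys (pvParent k) = N.keys := by
            simp [PySem.Set.add, hmem]
          rw [hadd]
        · intro q
          rw [ihd q]
          by_cases hq : N.contains q = true
          · rw [if_pos hq, if_pos hq]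
          · rw [if_neg hq, if_neg hq]
            have hqp : q ≠ pvParent k := by rintro rfl; exact hq hc
            have : (pvParent k == q) = false := by simp [Ne.symm hqp]
            rw [List.filter_cons, this]
            simp
      · have hc' : N.contains (pvParent k) = false := by simpa using hc
        have hstep : pvStepN d N k =
            N.insert (pvParent k) ((pvLookup d k).getD "") := by simp [pvStepN, hc']
        rw [hstep]
        obtain ⟨ihk, ihd⟩ := ih (N.insert (pvParent k) ((pvLookup d k).getD ""))
        constructor
        · rw [ihk, PySem.Dict.keys_insert_of_not_contains _ _ hc', List.map_cons]
          have hmem : pvParent k ∉ N.keys := fun h =>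
            by rw [(PySem.Dict.contains_iff_mem_keys _ _).mpr h] at hc'; exact absurd hc' (by simp)
          have : PySem.Set.update N.keys (pvParent k :: ks.map pvParent) =
              PySem.Set.update (PySem.Set.add N.keys (pvParent k)) (ks.map pvParent) := rfl
          rw [this]
          have hadd : PySem.Set.add N.keys (pvParent k) = N.keys ++ [pvParent k] := by
            simp [PySem.Set.add, hmem]
          rw [hadd]
        · intro q
          rw [ihd q]
          by_cases hq : N.contains q = true
          · have hqp : q ≠ pvParent k := by rintro rfl; exact hc hq
            rw [if_pos (by rw [PySem.Dict.contains_insert]; simp [hq]),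
                PySem.Dict.getD_insert, if_neg hqp, if_pos hq]
          · have hq' : N.contains q = false := by simpa using hq
            rw [if_neg hq]
            by_cases hqp : q = pvParent k
            · subst hqp
              rw [if_pos (by rw [PySem.Dict.contains_insert]; simp),
                  PySem.Dict.getD_insert, if_pos rfl, List.filter_cons]
              simp
            · rw [if_neg (by rw [PySem.Dict.contains_insert]; simp [hqp, hq']),
                  List.filter_cons]
              have : (pvParent k == q) = false := by simp [Ne.symm hqp]
              rw [this]
              simp

-- B's second loop never raises under the stated per-group conditions and is a plain insert fold
lemma pv_bfold (d : List (String × String)) : ∀ (items : List (String × List String))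
    (N : PySem.Dict String String),
    (∀ pm ∈ items, ∃ k0 rest, pm.2 = k0 :: rest ∧ (pvLookup d k0).isSome = true ∧
        ∀ x ∈ rest, pvLookup d x = pvLookup d k0) →
    items.foldl (pvBNameStep d) (some N) =
      some (items.foldl (fun n pm => n.insert pm.1 ((pvLookup d (pm.2.headD "")).getD "")) N) := by
  intro items
  induction items with
  | nil => intro N _; rfl
  | cons pm items ih =>
      intro N hall
      obtain ⟨k0, rest, hm, hsome, hrest⟩ := hall pm (by simp)
      obtain ⟨v, hv⟩ : ∃ v, pvLookup d k0 = some v := by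
        cases hval : pvLookup d k0
        · rw [hval] at hsome; simp at hsome
        · exact ⟨_, rfl⟩
      have hcheck : rest.all (fun k => pvLookup d k == some v) = true := by
        rw [List.all_eq_true]
        intro x hx
        rw [hrest x hx, hv]; simp
      have hstep : pvBNameStep d (some N) pm =
          some (N.insert pm.1 ((pvLookup d (pm.2.headD "")).getD "")) := by
        simp [pvBNameStep, hm, hv, hcheck]
      simp only [List.foldl_cons]
      rw [hstep]
      exact ih _ (fun x hx => hall x (by simp [hx]))

-- ===== VERDICT (by name: the statement is the Claim_ definition above) =====
theorem sCollapseToSrcId_spec : Claim_equal_sCollapseToSrcId := by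
  intro keys d _ hpre
  obtain ⟨h1, h2⟩ := hpre
  unfold Spec_sCollapseToSrcId sCollapseToSrcId sCollapseToSrcId_alt
  rw [pv_afold_split d keys h1 h2 keys (fun x hx => hx) PySem.Dict.empty PySem.Dict.empty
      (by intro p w hw; rw [PySem.Dict.get?_empty] at hw; cases hw)]
  -- facts about B's groups dict
  have hGk := pv_groups_keys keys
  have hGnd := pv_groups_nodup keys
  have hGd := pv_groups_getD keys
  have hGitems := PySem.Dict.items_eq_map_keys (pvBGroups keys) hGnd []
  -- membership in a group: nonempty, members from keys with the group's parent
  have hmemchar : ∀ q, ∀ x ∈ keys.filter (fun k => pvParent k == q), x ∈ keys ∧ pvParent x = q := by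
    intro q x hx
    obtain ⟨hx1, hx2⟩ := List.mem_filter.mp hx
    exact ⟨hx1, by simpa using hx2⟩
  have hgrp : ∀ pm ∈ (pvBGroups keys).items, ∃ k0 rest, pm.2 = k0 :: rest ∧
      (pvLookup d k0).isSome = true ∧ ∀ x ∈ rest, pvLookup d x = pvLookup d k0 := by
    intro pm hpm
    rw [hGitems] at hpm
    obtain ⟨q, hq, rfl⟩ := List.mem_map.mp hpm
    rw [hGk, PySem.Set.mem_ofList] at hq
    obtain ⟨k1, hk1, hk1p⟩ := List.mem_map.mp hq
    have hfil : k1 ∈ keys.filter (fun k => pvParent k == q) :=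
      List.mem_filter.mpr ⟨hk1, by simp [hk1p]⟩
    cases hfe : keys.filter (fun k => pvParent k == q) with
    | nil => rw [hfe] at hfil; cases hfil
    | cons k0 rest =>
        have hk0 := hmemchar q k0 (by rw [hfe]; simp)
        refine ⟨k0, rest, by simp [hGd, hfe], h1 k0 hk0.1, ?_⟩
        intro x hx
        have hx' := hmemchar q x (by rw [hfe]; simp [hx])
        exact h2 x hx'.1 k0 hk0.1 (by rw [hx'.2, hk0.2])
  dsimp only
  rw [pv_bfold d (pvBGroups keys).items PySem.Dict.empty hgrp]
  refine Prod.ext ?_ ?_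
  · -- first components: the collections dicts agree
    have hKC := pv_kc_groups keys PySem.Dict.empty PySem.Dict.empty
      rfl
      (by intro q; rw [PySem.Dict.getD_empty, PySem.Dict.getD_empty]; rfl)
    obtain ⟨hKk, hKd⟩ := hKC
    have hKk' : (keys.foldl pvStepKC PySem.Dict.empty).keys = (pvBGroups keys).keys := hKk
    have hKnd : (keys.foldl pvStepKC PySem.Dict.empty).keys.Nodup := by
      rw [hKk']; exact hGnd
    show (keys.foldl pvStepKC PySem.Dict.empty).items =
        (pvBGroups keys).items.map (fun pm => (pm.1, PySem.Set.ofList pm.2))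
    rw [PySem.Dict.items_eq_map_keys _ hKnd PySem.Set.empty, hKk', hGitems, List.map_map]
    refine List.map_congr_left (fun q _ => ?_)
    simp only [Function.comp_def]
    exact congrArg (fun s => (q, s)) (hKd q)
  · -- second components: the name dicts agree
    have hNchar := pv_na_char d keys PySem.Dict.empty
    obtain ⟨hNk, hNd⟩ := hNchar
    have hNk' : (keys.foldl (pvStepN d) PySem.Dict.empty).keys =
        PySem.Set.ofList (keys.map pvParent) := by
      rw [hNk, PySem.Dict.keys_empty]; rfl
    have hNnd : (keys.foldl (pvStepN d) PySem.Dict.empty).keys.Nodup := by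
      rw [hNk']; exact PySem.Set.nodup_ofList _
    have hfresh := PySem.Dict.items_foldl_insert_fresh (pvBGroups keys).items
      (fun pm => pm.1) (fun pm => (pvLookup d (pm.2.headD "")).getD "") PySem.Dict.empty
      (fun a _ => PySem.Dict.contains_empty _) hGnd
    show (keys.foldl (pvStepN d) PySem.Dict.empty).items =
        ((pvBGroups keys).items.foldl
          (fun n pm => n.insert pm.1 ((pvLookup d (pm.2.headD "")).getD ""))
          PySem.Dict.empty).items
    rw [hfresh, PySem.Dict.items_eq_map_keys _ hNnd "", hNk', hGitems, List.map_map]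
    show _ = (pvBGroups keys).keys.map _
    rw [hGk]
    refine List.map_congr_left ?_
    intro q hq
    rw [PySem.Set.mem_ofList] at hq
    obtain ⟨k1, hk1, hk1p⟩ := List.mem_map.mp hq
    have hfil : k1 ∈ keys.filter (fun k => pvParent k == q) :=
      List.mem_filter.mpr ⟨hk1, by simp [hk1p]⟩
    rw [hNd q, if_neg (by rw [PySem.Dict.contains_empty]; simp)]
    cases hfe : keys.filter (fun k => pvParent k == q) with
    | nil => rw [hfe] at hfil; cases hfil
    | cons k0 rest => simp [hfe, hGd]
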